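-- pv_equiv track=rewrite | github.com/hansen487/CS-UY1134 | CS-UY 1134/HW/hc1941_hw12.py | lcsScores
-- ===== SOURCE A (Python) =====
-- def lcsScores(string1, string2, Scores, D=None, one = 0, two = 0):
--     if D == None:
--         D = {}
--         for c in string1:
--             if c not in Scores:
--                 string1 = string1.replace(c, '')
--         for c in string2:
--             if c not in Scores:
--                 string2 = string2.replace(c, '')
--     if (one, two) in D:
--         return D[(one, two)]
--     if len(string1) == one or len(string2) == two:
--         return ('', 0)
--     if string1[one] != string2[two]:
--         try1 = lcsScores(string1, string2, Scores, D, one + 1, two)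
--         try2 = lcsScores(string1, string2, Scores, D, one, two + 1)
--         if try1[1]>try2[1]:
--             D[(one, two)] = try1
--             return D[(one, two)]
--         else:
--             D[(one, two)] = try2
--             return D[(one, two)]
--     else:
--         t = lcsScores(string1, string2, Scores, D, one + 1, two + 1)
--         D[(one, two)] = (string1[one] + t[0], Scores[string1[one]] + t[1])
--         return D[(one, two)]
-- ===== SOURCE B (Python) =====
-- # B: iterative depth-first worklist instead of A's deep memoized recursion (same memo dict API).
-- def lcsScores(string1, string2, Scores, D=None, one=0, two=0):
--     if D is None:
--         D = {}
--         string1 = ''.join(c for c in string1 if c in Scores)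
--         string2 = ''.join(c for c in string2 if c in Scores)
--
--     def known(i, j):
--         if (i, j) in D:
--             return D[(i, j)]
--         if i == len(string1) or j == len(string2):
--             return ('', 0)
--         return None
--
--     stack = [(one, two)]
--     while stack:
--         i, j = stack.pop()
--         if known(i, j) is not None:
--             continue
--         if string1[i] == string2[j]:
--             t = known(i + 1, j + 1)
--             if t is None:
--                 stack += [(i, j), (i + 1, j + 1)]
--             else:
--                 D[(i, j)] = (string1[i] + t[0], Scores[string1[i]] + t[1])
--         else:
--             a, b = known(i + 1, j), known(i, j + 1)
--             if a is None or b is None: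
--                 stack += [(i, j), (i, j + 1), (i + 1, j)]
--             else:
--                 D[(i, j)] = a if a[1] > b[1] else b
--     return known(one, two)
-- ===== Notes on version B (the rewrite author's own statement) =====
-- stated objective: alternative
-- what changed: Replaces A's deep memoized recursion by an iterative depth-first worklist (explicit stack) over the same memo dict; Pre_ excludes inputs where A raises (IndexError/KeyError: start offsets beyond the wrap range, or a shared character missing from Scores when a memo dict is supplied) -- its missing-score condition slightly over-excludes calls whose colliding cells are all shielded by seeded memo entries, on which both programs still return the same value.
-- outside the precondition, e.g. on lcsScores('ba', 'a', {}, {(1, 0): ('z', 7)}, 0, 0): A returns ('z', 7), B returns ('z', 7)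
import Mathlib
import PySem

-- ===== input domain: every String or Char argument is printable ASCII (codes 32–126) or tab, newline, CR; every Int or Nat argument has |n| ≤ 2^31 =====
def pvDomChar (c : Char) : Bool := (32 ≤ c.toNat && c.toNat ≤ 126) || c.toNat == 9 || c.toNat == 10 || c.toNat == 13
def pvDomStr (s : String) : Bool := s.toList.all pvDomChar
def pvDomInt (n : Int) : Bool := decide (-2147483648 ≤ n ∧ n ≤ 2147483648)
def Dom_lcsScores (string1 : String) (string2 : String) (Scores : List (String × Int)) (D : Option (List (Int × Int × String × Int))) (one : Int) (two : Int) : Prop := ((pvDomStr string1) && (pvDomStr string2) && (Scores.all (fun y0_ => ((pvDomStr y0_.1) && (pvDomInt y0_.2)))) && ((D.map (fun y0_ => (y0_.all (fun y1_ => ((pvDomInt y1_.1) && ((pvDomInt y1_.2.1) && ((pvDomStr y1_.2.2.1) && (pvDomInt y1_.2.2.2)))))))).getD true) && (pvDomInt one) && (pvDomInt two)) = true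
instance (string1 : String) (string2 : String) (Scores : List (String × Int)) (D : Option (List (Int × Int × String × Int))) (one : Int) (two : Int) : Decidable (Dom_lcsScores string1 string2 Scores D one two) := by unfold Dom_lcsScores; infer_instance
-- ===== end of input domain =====

-- B replaces A's deep memoized recursion by an iterative depth-first worklist over the same memo
-- dict (recursion ↔ explicit stack).  Both Pythons mutate the caller-passed dict D; the
-- equivalence proved here is about the return value only.

-- ===== PORT A =====
-- decoding of the dict-typed argument (done by the test harness in Python)
def pvMemoOfList (l : List (Int × Int × String × Int)) : PySem.Dict (Int × Int) (List Char × Int) :=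
  PySem.Dict.ofList (l.map (fun q => ((q.1, q.2.1), (q.2.2.1.toList, q.2.2.2))))

-- A's preprocessing loop: 'for c in string1: if c not in Scores: string1 = string1.replace(c, "")'
def pvStripA (sc : PySem.Dict String Int) (s : List Char) : List Char :=
  s.foldl (fun cur c => if sc.contains (String.singleton c) then cur else PySem.Chars.replace cur [c] []) s

-- A's memoized recursion; the fuel only makes it structural (Python raises where pyGet? is none)
def pvLcsRecA (s1 s2 : List Char) (sc : PySem.Dict String Int) :
    Nat → PySem.Dict (Int × Int) (List Char × Int) → Int → Int →
    (List Char × Int) × PySem.Dict (Int × Int) (List Char × Int)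
  | 0, memo, _, _ => (([], 0), memo)
  | fuel+1, memo, one, two =>
    match memo.get? (one, two) with
    | some v => (v, memo)
    | none =>
      if (s1.length : Int) = one ∨ (s2.length : Int) = two then (([], 0), memo)
      else
        match PySem.List.pyGet? s1 one, PySem.List.pyGet? s2 two with
        | some c1, some c2 =>
          if c1 ≠ c2 then
            let r1 := pvLcsRecA s1 s2 sc fuel memo (one+1) two
            let r2 := pvLcsRecA s1 s2 sc fuel r1.2 one (two+1)
            if r1.1.2 > r2.1.2 then (r1.1, r2.2.insert (one, two) r1.1)
            else (r2.1, r2.2.insert (one, two) r2.1)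
          else
            let r := pvLcsRecA s1 s2 sc fuel memo (one+1) (two+1)
            let v := (c1 :: r.1.1, sc.getD (String.singleton c1) 0 + r.1.2)
            (v, r.2.insert (one, two) v)
        | _, _ => (([], 0), memo)

def lcsScores (string1 : String) (string2 : String) (Scores : List (String × Int)) (D : Option (List (Int × Int × String × Int))) (one : Int) (two : Int) : String × Int :=
  let sc := PySem.Dict.ofList Scores
  let t : List Char × List Char × PySem.Dict (Int × Int) (List Char × Int) :=
    match D with
    | none => (pvStripA sc string1.toList, pvStripA sc string2.toList, PySem.Dict.empty)
    | some l => (string1.toList, string2.toList, pvMemoOfList l)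
  let fuel := ((t.1.length : Int) - one).toNat + ((t.2.1.length : Int) - two).toNat + 1
  let r := pvLcsRecA t.1 t.2.1 sc fuel t.2.2 one two
  (String.ofList r.1.1, r.1.2)

-- ===== PORT B =====
-- Source B's 'known(i, j)': the memo entry, ('', 0) at the table edge, None when still to compute
def pvKnown (s1 s2 : List Char) (D : PySem.Dict (Int × Int) (List Char × Int)) (i j : Int) :
    Option (List Char × Int) :=
  match D.get? (i, j) with
  | some v => some v
  | none => if (s1.length : Int) = i ∨ (s2.length : Int) = j then some ([], 0) else none

-- Source B's while loop over the explicit stack; the fuel only makes it structural (the loop always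
-- terminates when the Python does; Python raises where pyGet? is none, the port skips the frame)
def pvRunB (s1 s2 : List Char) (sc : PySem.Dict String Int) :
    Nat → List (Int × Int) → PySem.Dict (Int × Int) (List Char × Int) →
    PySem.Dict (Int × Int) (List Char × Int)
  | 0, _, D => D
  | _+1, [], D => D
  | f+1, (i, j) :: rest, D =>
    match pvKnown s1 s2 D i j with
    | some _ => pvRunB s1 s2 sc f rest D
    | none =>
      match PySem.List.pyGet? s1 i, PySem.List.pyGet? s2 j with
      | some c1, some c2 =>
        if c1 = c2 then
          match pvKnown s1 s2 D (i+1) (j+1) with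
          | none => pvRunB s1 s2 sc f ((i+1, j+1) :: (i, j) :: rest) D
          | some t => pvRunB s1 s2 sc f rest
              (D.insert (i, j) (c1 :: t.1, sc.getD (String.singleton c1) 0 + t.2))
        else
          match pvKnown s1 s2 D (i+1) j, pvKnown s1 s2 D i (j+1) with
          | some a, some b => pvRunB s1 s2 sc f rest
              (D.insert (i, j) (if a.2 > b.2 then a else b))
          | _, _ => pvRunB s1 s2 sc f ((i+1, j) :: (i, j+1) :: (i, j) :: rest) D
      | _, _ => pvRunB s1 s2 sc f rest D

def lcsScores_alt (string1 : String) (string2 : String) (Scores : List (String × Int)) (D : Option (List (Int × Int × String × Int))) (one : Int) (two : Int) : String × Int :=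
  let sc := PySem.Dict.ofList Scores
  let t : List Char × List Char × PySem.Dict (Int × Int) (List Char × Int) :=
    match D with
    | none => (string1.toList.filter (fun c => sc.contains (String.singleton c)),
               string2.toList.filter (fun c => sc.contains (String.singleton c)),
               PySem.Dict.empty)
    | some l => (string1.toList, string2.toList, pvMemoOfList l)
  let fuel := 4 ^ (((t.1.length : Int) - one).toNat + ((t.2.1.length : Int) - two).toNat + 1)
  let Dfin := pvRunB t.1 t.2.1 sc fuel [(one, two)] t.2.2
  match pvKnown t.1 t.2.1 Dfin one two with
  | some v => (String.ofList v.1, v.2)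
  | none => ("", 0)   -- unreachable once the loop has drained the stack

-- ===== PRECONDITION & SPEC =====
-- Pre_ excludes exactly the inputs on which A raises: start offsets outside the wrap range of the
-- (stripped) strings that no base case or seeded memo entry intercepts (IndexError), and — when a
-- memo dict is supplied, so A skips its stripping step — a character shared by both strings but
-- missing from Scores (KeyError); that last condition slightly over-excludes calls whose colliding
-- cells are all shielded by seeded memo entries, on which A still returns (see the cite).
def Pre_lcsScores (string1 : String) (string2 : String) (Scores : List (String × Int)) (D : Option (List (Int × Int × String × Int))) (one : Int) (two : Int) : Prop :=
  (D = none ∧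
    ((-(((string1.toList.filter (fun c => (PySem.Dict.ofList Scores).contains (String.singleton c))).length : Int)) ≤ one ∧
      one ≤ ((string1.toList.filter (fun c => (PySem.Dict.ofList Scores).contains (String.singleton c))).length : Int) ∧
      -(((string2.toList.filter (fun c => (PySem.Dict.ofList Scores).contains (String.singleton c))).length : Int)) ≤ two ∧
      two ≤ ((string2.toList.filter (fun c => (PySem.Dict.ofList Scores).contains (String.singleton c))).length : Int)) ∨
     one = ((string1.toList.filter (fun c => (PySem.Dict.ofList Scores).contains (String.singleton c))).length : Int) ∨
     two = ((string2.toList.filter (fun c => (PySem.Dict.ofList Scores).contains (String.singleton c))).length : Int))) ∨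
  (D ≠ none ∧
    ((PySem.Dict.ofList ((D.getD []).map (fun q => ((q.1, q.2.1), q.2.2)))).contains (one, two) = true ∨
     one = (string1.toList.length : Int) ∨
     two = (string2.toList.length : Int) ∨
     (-(string1.toList.length : Int) ≤ one ∧ one ≤ (string1.toList.length : Int) ∧
      -(string2.toList.length : Int) ≤ two ∧ two ≤ (string2.toList.length : Int) ∧
      ∀ c ∈ string1.toList, c ∈ string2.toList → (PySem.Dict.ofList Scores).contains (String.singleton c) = true)))
instance (string1 : String) (string2 : String) (Scores : List (String × Int)) (D : Option (List (Int × Int × String × Int))) (one : Int) (two : Int) : Decidable (Pre_lcsScores string1 string2 Scores D one two) := by unfold Pre_lcsScores; infer_instance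

def pvWitness_lcsScores : String × String × (List (String × Int)) × (Option (List (Int × Int × String × Int))) × Int × Int :=
  ("ab", "ba", [("a", 2), ("b", 3)], none, 0, 0)

def Spec_lcsScores (string1 : String) (string2 : String) (Scores : List (String × Int)) (D : Option (List (Int × Int × String × Int))) (one : Int) (two : Int) (out : String × Int) : Prop := out = lcsScores_alt string1 string2 Scores D one two
instance (string1 : String) (string2 : String) (Scores : List (String × Int)) (D : Option (List (Int × Int × String × Int))) (one : Int) (two : Int) (out : String × Int) : Decidable (Spec_lcsScores string1 string2 Scores D one two out) := by unfold Spec_lcsScores; infer_instance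

-- ===== CLAIM (what is proved, stated in full; the proofs are below) =====
def Claim_equal_lcsScores : Prop := ∀ (string1 : String) (string2 : String) (Scores : List (String × Int)) (D : Option (List (Int × Int × String × Int))) (one : Int) (two : Int), Dom_lcsScores string1 string2 Scores D one two → Pre_lcsScores string1 string2 Scores D one two → Spec_lcsScores string1 string2 Scores D one two (lcsScores string1 string2 Scores D one two)

-- ===== LEMMAS AND PROOFS =====

-- the per-cell valuation both programs compute: the seeded memo wins, then the base rule, then
-- the recurrence (fuel-indexed; pvW is the canonical fuel)
def pvV (s1 s2 : List Char) (sc : PySem.Dict String Int)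
    (memo : PySem.Dict (Int × Int) (List Char × Int)) : Nat → Int → Int → List Char × Int
  | 0, i, j =>
    match memo.get? (i, j) with
    | some v => v
    | none => ([], 0)
  | n+1, i, j =>
    match memo.get? (i, j) with
    | some v => v
    | none =>
      if (s1.length : Int) = i ∨ (s2.length : Int) = j then ([], 0)
      else
        match PySem.List.pyGet? s1 i, PySem.List.pyGet? s2 j with
        | some c1, some c2 =>
          if c1 ≠ c2 then
            let a := pvV s1 s2 sc memo n (i+1) j
            let b := pvV s1 s2 sc memo n i (j+1)
            if a.2 > b.2 then a else b
          else
            let t := pvV s1 s2 sc memo n (i+1) (j+1)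
            (c1 :: t.1, sc.getD (String.singleton c1) 0 + t.2)
        | _, _ => ([], 0)

def pvM (s1 s2 : List Char) (i j : Int) : Nat :=
  ((s1.length : Int) - i).toNat + ((s2.length : Int) - j).toNat

def pvW (s1 s2 : List Char) (sc : PySem.Dict String Int)
    (memo : PySem.Dict (Int × Int) (List Char × Int)) (i j : Int) : List Char × Int :=
  pvV s1 s2 sc memo (pvM s1 s2 i j) i j

theorem pvV_irrel (s1 s2 : List Char) (sc : PySem.Dict String Int)
    (memo : PySem.Dict (Int × Int) (List Char × Int)) :
    ∀ (n m : Nat) (i j : Int), i ≤ (s1.length : Int) → j ≤ (s2.length : Int) →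
    pvM s1 s2 i j ≤ n → pvM s1 s2 i j ≤ m →
    pvV s1 s2 sc memo n i j = pvV s1 s2 sc memo m i j := by
  intro n
  induction n with
  | zero =>
    intro m i j hi hj hn hm
    have h0 : (s1.length : Int) = i := by unfold pvM at hn; omega
    rcases hmem : memo.get? (i, j) with _ | v <;> cases m <;> simp [pvV, hmem, h0]
  | succ n ih =>
    intro m i j hi hj hn hm
    rcases hmem : memo.get? (i, j) with _ | v
    · by_cases hb : (s1.length : Int) = i ∨ (s2.length : Int) = j
      · cases m with
        | zero => simp [pvV, hmem, hb]
        | succ m => simp [pvV, hmem, hb]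
      · rw [not_or] at hb
        have hi' : i < (s1.length : Int) := lt_of_le_of_ne hi (fun h => hb.1 h.symm)
        have hj' : j < (s2.length : Int) := lt_of_le_of_ne hj (fun h => hb.2 h.symm)
        have hmpos : 1 ≤ pvM s1 s2 i j := by unfold pvM; omega
        cases m with
        | zero => omega
        | succ m =>
          have hb' : ¬ ((s1.length : Int) = i ∨ (s2.length : Int) = j) := by omega
          rcases hg1 : PySem.List.pyGet? s1 i with _ | c1 <;>
          rcases hg2 : PySem.List.pyGet? s2 j with _ | c2 <;>
            simp only [pvV, hmem, hb', if_false, hg1, hg2]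
          have e1 := ih m (i+1) j (by omega) hj (by unfold pvM at *; omega) (by unfold pvM at *; omega)
          have e2 := ih m i (j+1) hi (by omega) (by unfold pvM at *; omega) (by unfold pvM at *; omega)
          have e3 := ih m (i+1) (j+1) (by omega) (by omega) (by unfold pvM at *; omega) (by unfold pvM at *; omega)
          by_cases hc : c1 = c2 <;> simp [hc, e1, e2, e3]
    · cases m <;> simp [pvV, hmem]

theorem pvV_eq_of_le (s1 s2 : List Char) (sc : PySem.Dict String Int)
    (memo : PySem.Dict (Int × Int) (List Char × Int))
    (n : Nat) (i j : Int) (hi : i ≤ (s1.length : Int)) (hj : j ≤ (s2.length : Int))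
    (hn : pvM s1 s2 i j ≤ n) : pvV s1 s2 sc memo n i j = pvW s1 s2 sc memo i j :=
  pvV_irrel s1 s2 sc memo n (pvM s1 s2 i j) i j hi hj hn (le_refl _)

theorem pvW_memo (s1 s2 : List Char) (sc : PySem.Dict String Int)
    (memo : PySem.Dict (Int × Int) (List Char × Int)) (i j : Int) (v : List Char × Int)
    (hmem : memo.get? (i, j) = some v) : pvW s1 s2 sc memo i j = v := by
  unfold pvW
  rcases hm : pvM s1 s2 i j with _ | m <;> simp [pvV, hmem]

theorem pvW_base (s1 s2 : List Char) (sc : PySem.Dict String Int)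
    (memo : PySem.Dict (Int × Int) (List Char × Int)) (i j : Int)
    (hmem : memo.get? (i, j) = none)
    (h : (s1.length : Int) = i ∨ (s2.length : Int) = j) : pvW s1 s2 sc memo i j = ([], 0) := by
  unfold pvW
  rcases hm : pvM s1 s2 i j with _ | m <;> simp [pvV, hmem, h]

theorem pvW_step (s1 s2 : List Char) (sc : PySem.Dict String Int)
    (memo : PySem.Dict (Int × Int) (List Char × Int)) (i j : Int)
    (hmem : memo.get? (i, j) = none)
    (hi : i < (s1.length : Int)) (hj : j < (s2.length : Int)) :
    pvW s1 s2 sc memo i j =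
      match PySem.List.pyGet? s1 i, PySem.List.pyGet? s2 j with
      | some c1, some c2 =>
        if c1 ≠ c2 then
          let a := pvW s1 s2 sc memo (i+1) j
          let b := pvW s1 s2 sc memo i (j+1)
          if a.2 > b.2 then a else b
        else
          let t := pvW s1 s2 sc memo (i+1) (j+1)
          (c1 :: t.1, sc.getD (String.singleton c1) 0 + t.2)
      | _, _ => ([], 0) := by
  have hb' : ¬ ((s1.length : Int) = i ∨ (s2.length : Int) = j) := by omega
  have hm : pvM s1 s2 i j = (pvM s1 s2 i j - 1) + 1 := by unfold pvM; omega
  conv_lhs => rw [pvW, hm]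
  rcases hg1 : PySem.List.pyGet? s1 i with _ | c1 <;>
  rcases hg2 : PySem.List.pyGet? s2 j with _ | c2 <;>
    simp only [pvV, hmem, hb', if_false, hg1, hg2]
  have e1 := pvV_eq_of_le s1 s2 sc memo (pvM s1 s2 i j - 1) (i+1) j (by omega) (by omega) (by unfold pvM; omega)
  have e2 := pvV_eq_of_le s1 s2 sc memo (pvM s1 s2 i j - 1) i (j+1) (by omega) (by omega) (by unfold pvM; omega)
  have e3 := pvV_eq_of_le s1 s2 sc memo (pvM s1 s2 i j - 1) (i+1) (j+1) (by omega) (by omega) (by unfold pvM; omega)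
  by_cases hc : c1 = c2 <;> simp [hc, e1, e2, e3]

theorem pyGet?_isSome_of_range (xs : List Char) (i : Int) (h1 : -(xs.length : Int) ≤ i)
    (h2 : i < (xs.length : Int)) : ∃ c, PySem.List.pyGet? xs i = some c := by
  have hn : ¬ (PySem.List.pyGet? xs i = none) := by
    rw [PySem.List.pyGet?_eq_none_iff]
    simp only [PySem.Raise.InRange, not_and, not_lt, not_forall, not_le]
    exact ⟨h1, h2⟩
  rcases h : PySem.List.pyGet? xs i with _ | c
  · exact absurd h hn
  · exact ⟨c, rfl⟩

-- A's recursion computes pvW and only ever stores pvW values in its memo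
theorem recA_correct (s1 s2 : List Char) (sc : PySem.Dict String Int)
    (M0 : PySem.Dict (Int × Int) (List Char × Int)) :
    ∀ (fuel : Nat) (one two : Int) (memo : PySem.Dict (Int × Int) (List Char × Int)),
    (∀ p v, memo.get? p = some v → v = pvW s1 s2 sc M0 p.1 p.2) →
    (∀ p v, M0.get? p = some v → memo.get? p = some v) →
    -(s1.length : Int) ≤ one → one ≤ (s1.length : Int) →
    -(s2.length : Int) ≤ two → two ≤ (s2.length : Int) →
    pvM s1 s2 one two < fuel →
    (pvLcsRecA s1 s2 sc fuel memo one two).1 = pvW s1 s2 sc M0 one two ∧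
    ((∀ p v, (pvLcsRecA s1 s2 sc fuel memo one two).2.get? p = some v → v = pvW s1 s2 sc M0 p.1 p.2) ∧
     (∀ p v, M0.get? p = some v → (pvLcsRecA s1 s2 sc fuel memo one two).2.get? p = some v)) := by
  intro fuel
  induction fuel with
  | zero => intro one two memo hm hs h1 h2 h3 h4 hf; omega
  | succ fuel ih =>
    intro one two memo hm hs h1 h2 h3 h4 hf
    rcases hmem : memo.get? (one, two) with _ | v
    · have hM0 : M0.get? (one, two) = none := by
        rcases h0 : M0.get? (one, two) with _ | w
        · rfl
        · rw [hs (one, two) w h0] at hmem; cases hmem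
      by_cases hb : (s1.length : Int) = one ∨ (s2.length : Int) = two
      · refine ⟨?_, ?_, ?_⟩
        · simp only [pvLcsRecA, hmem, hb, if_true, pvW_base s1 s2 sc M0 one two hM0 hb]
        · intro p v hv
          simp only [pvLcsRecA, hmem, hb, if_true] at hv
          exact hm p v hv
        · intro p v hv
          simp only [pvLcsRecA, hmem, hb, if_true]
          exact hs p v hv
      · have hone : one < (s1.length : Int) := by omega
        have htwo : two < (s2.length : Int) := by omega
        obtain ⟨c1, hc1⟩ := pyGet?_isSome_of_range s1 one h1 hone
        obtain ⟨c2, hc2⟩ := pyGet?_isSome_of_range s2 two h3 htwo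
        have hW := pvW_step s1 s2 sc M0 one two hM0 hone htwo
        rw [hc1, hc2] at hW
        have hinsert : ∀ (d : PySem.Dict (Int × Int) (List Char × Int)) (w : List Char × Int),
            (∀ p v, d.get? p = some v → v = pvW s1 s2 sc M0 p.1 p.2) →
            (∀ p v, M0.get? p = some v → d.get? p = some v) →
            w = pvW s1 s2 sc M0 one two →
            (∀ p v, (d.insert (one, two) w).get? p = some v → v = pvW s1 s2 sc M0 p.1 p.2) ∧
            (∀ p v, M0.get? p = some v → (d.insert (one, two) w).get? p = some v) := by
          intro d w hd hds hw
          constructor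
          · intro p v hv
            rw [PySem.Dict.get?_insert] at hv
            by_cases hp : p = (one, two)
            · simp only [hp, if_true] at hv
              cases hv
              subst hp
              exact hw
            · simp only [hp, if_false] at hv
              exact hd p v hv
          · intro p v hv
            have hp : p ≠ (one, two) := by
              intro h; rw [h, hM0] at hv; cases hv
            rw [PySem.Dict.get?_insert, if_neg hp]
            exact hds p v hv
        by_cases hcc : c1 = c2
        · obtain ⟨ihv, ihm, ihs⟩ := ih (one+1) (two+1) memo hm hs (by omega) (by omega) (by omega) (by omega)
            (by unfold pvM at *; omega)
          simp only [pvLcsRecA, hmem, hb, if_false, hc1, hc2, hcc, ne_eq, not_true_eq_false]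
          simp only [hcc, ne_eq, not_true_eq_false, if_false] at hW
          refine ⟨by rw [ihv, hW], ?_, ?_⟩
          · exact (hinsert _ _ ihm ihs (by rw [ihv, hW])).1
          · exact (hinsert _ _ ihm ihs (by rw [ihv, hW])).2
        · obtain ⟨ihv1, ihm1, ihs1⟩ := ih (one+1) two memo hm hs (by omega) (by omega) h3 h4
            (by unfold pvM at *; omega)
          obtain ⟨ihv2, ihm2, ihs2⟩ := ih one (two+1) _ ihm1 ihs1 h1 h2 (by omega) (by omega)
            (by unfold pvM at *; omega)
          simp only [pvLcsRecA, hmem, hb, if_false, hc1, hc2, hcc, ne_eq, not_false_eq_true, if_true]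
          simp only [ne_eq, hcc, not_false_eq_true, if_true] at hW
          rw [ihv1, ihv2]
          by_cases hgt : (pvW s1 s2 sc M0 (one+1) two).2 > (pvW s1 s2 sc M0 one (two+1)).2
          · simp only [hgt, if_true]
            refine ⟨by rw [hW]; simp [hgt], ?_, ?_⟩
            · exact (hinsert _ _ ihm2 ihs2 (by rw [hW]; simp [hgt])).1
            · exact (hinsert _ _ ihm2 ihs2 (by rw [hW]; simp [hgt])).2
          · simp only [hgt, if_false]
            refine ⟨by rw [hW]; simp [hgt], ?_, ?_⟩
            · exact (hinsert _ _ ihm2 ihs2 (by rw [hW]; simp [hgt])).1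
            · exact (hinsert _ _ ihm2 ihs2 (by rw [hW]; simp [hgt])).2
    · refine ⟨?_, ?_, ?_⟩
      · simp only [pvLcsRecA, hmem]
        exact hm (one, two) v hmem
      · intro p w hw
        simp only [pvLcsRecA, hmem] at hw
        exact hm p w hw
      · intro p w hw
        simp only [pvLcsRecA, hmem]
        exact hs p w hw

-- A at a memo hit
theorem recA_hit (t1 t2 : List Char) (sc : PySem.Dict String Int)
    (M0 : PySem.Dict (Int × Int) (List Char × Int)) (f : Nat) (one two : Int)
    (v : List Char × Int) (hv : M0.get? (one, two) = some v) :
    (pvLcsRecA t1 t2 sc (f+1) M0 one two).1 = v := by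
  simp [pvLcsRecA, hv]

-- A at the table edge with no memo entry
theorem recA_edge (t1 t2 : List Char) (sc : PySem.Dict String Int)
    (M0 : PySem.Dict (Int × Int) (List Char × Int)) (f : Nat) (one two : Int)
    (hv : M0.get? (one, two) = none)
    (h : (t1.length : Int) = one ∨ (t2.length : Int) = two) :
    (pvLcsRecA t1 t2 sc (f+1) M0 one two).1 = ([], 0) := by
  simp [pvLcsRecA, hv, h]

-- ----- pvKnown helpers -----

theorem known_of_get (s1 s2 : List Char) (D : PySem.Dict (Int × Int) (List Char × Int))
    (i j : Int) (v : List Char × Int) (h : D.get? (i, j) = some v) :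
    pvKnown s1 s2 D i j = some v := by
  unfold pvKnown; rw [h]

theorem known_none (s1 s2 : List Char) (D : PySem.Dict (Int × Int) (List Char × Int))
    (i j : Int) (h : pvKnown s1 s2 D i j = none) :
    D.get? (i, j) = none ∧ ¬ ((s1.length : Int) = i ∨ (s2.length : Int) = j) := by
  unfold pvKnown at h
  rcases hg : D.get? (i, j) with _ | v
  · rw [hg] at h
    by_cases hb : (s1.length : Int) = i ∨ (s2.length : Int) = j
    · simp [hb] at h
    · exact ⟨rfl, hb⟩
  · rw [hg] at h; cases h

theorem known_some_edge (s1 s2 : List Char) (D : PySem.Dict (Int × Int) (List Char × Int))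
    (i j : Int) (hg : D.get? (i, j) = none)
    (hb : (s1.length : Int) = i ∨ (s2.length : Int) = j) :
    pvKnown s1 s2 D i j = some ([], 0) := by
  unfold pvKnown
  rw [hg]
  exact if_pos hb

theorem known_none_intro (s1 s2 : List Char) (D : PySem.Dict (Int × Int) (List Char × Int))
    (i j : Int) (hg : D.get? (i, j) = none)
    (hb : ¬ ((s1.length : Int) = i ∨ (s2.length : Int) = j)) :
    pvKnown s1 s2 D i j = none := by
  unfold pvKnown; rw [hg]; simp [hb]

-- a resolved cell carries its pvW value
theorem known_correct (s1 s2 : List Char) (sc : PySem.Dict String Int)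
    (M0 D : PySem.Dict (Int × Int) (List Char × Int))
    (hInv : ∀ p v, D.get? p = some v → v = pvW s1 s2 sc M0 p.1 p.2)
    (hSup : ∀ p v, M0.get? p = some v → D.get? p = some v)
    (i j : Int) (v : List Char × Int) (h : pvKnown s1 s2 D i j = some v) :
    v = pvW s1 s2 sc M0 i j := by
  unfold pvKnown at h
  rcases hg : D.get? (i, j) with _ | w
  · rw [hg] at h
    by_cases hb : (s1.length : Int) = i ∨ (s2.length : Int) = j
    · simp only [hb, if_true, Option.some.injEq] at h
      have hM0 : M0.get? (i, j) = none := by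
        rcases h0 : M0.get? (i, j) with _ | u
        · rfl
        · rw [hSup (i, j) u h0] at hg; cases hg
      rw [← h, pvW_base s1 s2 sc M0 i j hM0 hb]
    · simp [hb] at h
  · rw [hg] at h
    cases h
    exact hInv _ _ hg

-- resolvedness is stable under growing the dict (as long as it stays correct)
theorem known_stable (s1 s2 : List Char) (sc : PySem.Dict String Int)
    (M0 D D' : PySem.Dict (Int × Int) (List Char × Int))
    (hInv' : ∀ p v, D'.get? p = some v → v = pvW s1 s2 sc M0 p.1 p.2)
    (hMono : ∀ p v, D.get? p = some v → D'.get? p = some v)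
    (i j : Int) (h : pvKnown s1 s2 D i j = some (pvW s1 s2 sc M0 i j)) :
    pvKnown s1 s2 D' i j = some (pvW s1 s2 sc M0 i j) := by
  rcases hg' : D'.get? (i, j) with _ | u
  · unfold pvKnown at h ⊢
    rcases hg : D.get? (i, j) with _ | w
    · rw [hg] at h
      rw [hg']
      exact h
    · rw [hMono _ _ hg] at hg'
      cases hg'
  · have hu : u = pvW s1 s2 sc M0 i j := hInv' _ _ hg'
    unfold pvKnown
    rw [hg', hu]

theorem pow4_succ (k : Nat) : ∃ f, 4 ^ k = f + 1 :=
  ⟨4 ^ k - 1, by have := Nat.one_le_pow k 4 (by norm_num); omega⟩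

theorem runB_nil (s1 s2 : List Char) (sc : PySem.Dict String Int) (f : Nat)
    (D : PySem.Dict (Int × Int) (List Char × Int)) : pvRunB s1 s2 sc f [] D = D := by
  cases f <;> rfl

-- ----- the worklist drains each frame and leaves it resolved at its pvW value -----

theorem runB_go (s1 s2 : List Char) (sc : PySem.Dict String Int)
    (M0 : PySem.Dict (Int × Int) (List Char × Int)) :
    ∀ (n : Nat) (i j : Int) (D : PySem.Dict (Int × Int) (List Char × Int)),
    (∀ p v, D.get? p = some v → v = pvW s1 s2 sc M0 p.1 p.2) →
    (∀ p v, M0.get? p = some v → D.get? p = some v) →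
    -(s1.length : Int) ≤ i → i ≤ (s1.length : Int) →
    -(s2.length : Int) ≤ j → j ≤ (s2.length : Int) →
    pvM s1 s2 i j < n →
    ∃ (N : Nat) (D' : PySem.Dict (Int × Int) (List Char × Int)),
      1 ≤ N ∧ N ≤ 4 ^ n ∧
      (∀ (f : Nat) (rest : List (Int × Int)), N ≤ f →
        pvRunB s1 s2 sc f ((i, j) :: rest) D = pvRunB s1 s2 sc (f - N) rest D') ∧
      (∀ p v, D'.get? p = some v → v = pvW s1 s2 sc M0 p.1 p.2) ∧
      (∀ p v, D.get? p = some v → D'.get? p = some v) ∧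
      (∀ p v, D'.get? p = some v → D.get? p = some v ∨ (i ≤ p.1 ∧ j ≤ p.2)) ∧
      pvKnown s1 s2 D' i j = some (pvW s1 s2 sc M0 i j) := by
  intro n
  induction n with
  | zero => intro i j D _ _ _ _ _ _ hn; omega
  | succ n ih =>
    intro i j D hInv hSup hi1 hi2 hj1 hj2 hn
    have h4pos : 1 ≤ 4 ^ n := Nat.one_le_pow n 4 (by norm_num)
    have h4succ : 4 ^ (n + 1) = 4 ^ n * 4 := pow_succ 4 n
    rcases hk : pvKnown s1 s2 D i j with _ | v
    · -- unresolved frame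
      obtain ⟨hDm, hbnd⟩ := known_none s1 s2 D i j hk
      have hM0m : M0.get? (i, j) = none := by
        rcases h0 : M0.get? (i, j) with _ | w
        · rfl
        · rw [hSup (i, j) w h0] at hDm; cases hDm
      rw [not_or] at hbnd
      have hi' : i < (s1.length : Int) := lt_of_le_of_ne hi2 (fun h => hbnd.1 h.symm)
      have hj' : j < (s2.length : Int) := lt_of_le_of_ne hj2 (fun h => hbnd.2 h.symm)
      obtain ⟨c1, hc1⟩ := pyGet?_isSome_of_range s1 i hi1 hi'
      obtain ⟨c2, hc2⟩ := pyGet?_isSome_of_range s2 j hj1 hj'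
      have hW := pvW_step s1 s2 sc M0 i j hM0m hi' hj'
      rw [hc1, hc2] at hW
      have hinsert : ∀ (d : PySem.Dict (Int × Int) (List Char × Int)),
          (∀ p v, d.get? p = some v → v = pvW s1 s2 sc M0 p.1 p.2) →
          (∀ p v, (d.insert (i, j) (pvW s1 s2 sc M0 i j)).get? p = some v →
            v = pvW s1 s2 sc M0 p.1 p.2) := by
        intro d hd p v hv
        rw [PySem.Dict.get?_insert] at hv
        by_cases hp : p = (i, j)
        · simp only [hp, if_true] at hv
          cases hv
          subst hp
          rfl
        · simp only [hp, if_false] at hv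
          exact hd p v hv
      by_cases hcc : c1 = c2
      · subst hcc
        simp only [ne_eq, not_true_eq_false, if_false] at hW
        rcases hk2 : pvKnown s1 s2 D (i+1) (j+1) with _ | t
        · -- child missing: one push step, process the child, one compute step
          obtain ⟨Nc, Dc, hNc1, hNc4, hstepc, hInvC, hMonC, hDomC, hResC⟩ :=
            ih (i+1) (j+1) D hInv hSup (by omega) (by omega) (by omega) (by omega)
              (by unfold pvM at *; omega)
          have hDcm : Dc.get? (i, j) = none := by
            rcases h0 : Dc.get? (i, j) with _ | w
            · rfl
            · rcases hDomC (i, j) w h0 with hin | ⟨ha, _⟩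
              · rw [hDm] at hin; cases hin
              · have ha' : i + 1 ≤ i := by simpa using ha
                omega
          have hkDc : pvKnown s1 s2 Dc i j = none :=
            known_none_intro s1 s2 Dc i j hDcm (by omega)
          refine ⟨Nc + 2, Dc.insert (i, j) (pvW s1 s2 sc M0 i j), by omega, by omega, ?_, ?_, ?_, ?_, ?_⟩
          · intro f rest hf
            obtain ⟨f', rfl⟩ : ∃ f', f = f' + 1 := ⟨f - 1, by omega⟩
            have step1 : pvRunB s1 s2 sc (f' + 1) ((i, j) :: rest) D
                = pvRunB s1 s2 sc f' ((i+1, j+1) :: (i, j) :: rest) D := by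
              simp [pvRunB, hk, hc1, hc2, hk2]
            rw [step1, hstepc f' ((i, j) :: rest) (by omega)]
            obtain ⟨g, hg⟩ : ∃ g, f' - Nc = g + 1 := ⟨f' - Nc - 1, by omega⟩
            rw [hg]
            have step2 : pvRunB s1 s2 sc (g + 1) ((i, j) :: rest) Dc
                = pvRunB s1 s2 sc g rest
                    (Dc.insert (i, j) (c1 :: (pvW s1 s2 sc M0 (i+1) (j+1)).1,
                      sc.getD (String.singleton c1) 0 + (pvW s1 s2 sc M0 (i+1) (j+1)).2)) := by
              simp [pvRunB, hkDc, hc1, hc2, hResC]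
            rw [step2, ← hW]
            first
            | (congr 1; omega)
            | congr 1
          · exact hinsert Dc hInvC
          · intro p v hv
            have hp : p ≠ (i, j) := by
              intro h; rw [h, hDm] at hv; cases hv
            rw [PySem.Dict.get?_insert, if_neg hp]
            exact hMonC p v hv
          · intro p v hv
            rw [PySem.Dict.get?_insert] at hv
            by_cases hp : p = (i, j)
            · right; rw [hp]; exact ⟨le_refl _, le_refl _⟩
            · rw [if_neg hp] at hv
              rcases hDomC p v hv with hin | ⟨ha, hb⟩
              · exact Or.inl hin
              · right; omega
          · exact known_of_get _ _ _ i j _ (by rw [PySem.Dict.get?_insert, if_pos rfl])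
        · -- child ready: one compute step
          have ht : t = pvW s1 s2 sc M0 (i+1) (j+1) :=
            known_correct s1 s2 sc M0 D hInv hSup (i+1) (j+1) t hk2
          refine ⟨1, D.insert (i, j) (pvW s1 s2 sc M0 i j), le_refl _, by omega, ?_, ?_, ?_, ?_, ?_⟩
          · intro f rest hf
            obtain ⟨f', rfl⟩ : ∃ f', f = f' + 1 := ⟨f - 1, by omega⟩
            have step1 : pvRunB s1 s2 sc (f' + 1) ((i, j) :: rest) D
                = pvRunB s1 s2 sc f' rest
                    (D.insert (i, j) (c1 :: t.1, sc.getD (String.singleton c1) 0 + t.2)) := by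
              simp [pvRunB, hk, hc1, hc2, hk2]
            rw [step1, ht, ← hW]
            first
            | (congr 1; omega)
            | congr 1
          · exact hinsert D hInv
          · intro p v hv
            have hp : p ≠ (i, j) := by
              intro h; rw [h, hDm] at hv; cases hv
            rw [PySem.Dict.get?_insert, if_neg hp]
            exact hv
          · intro p v hv
            rw [PySem.Dict.get?_insert] at hv
            by_cases hp : p = (i, j)
            · right; rw [hp]; exact ⟨le_refl _, le_refl _⟩
            · rw [if_neg hp] at hv
              exact Or.inl hv
          · exact known_of_get _ _ _ i j _ (by rw [PySem.Dict.get?_insert, if_pos rfl])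
      · simp only [ne_eq, hcc, not_false_eq_true, if_true] at hW
        have pushCase :
            (pvKnown s1 s2 D (i+1) j = none ∨ pvKnown s1 s2 D i (j+1) = none) →
            ∃ (N : Nat) (D' : PySem.Dict (Int × Int) (List Char × Int)),
              1 ≤ N ∧ N ≤ 4 ^ (n + 1) ∧
              (∀ (f : Nat) (rest : List (Int × Int)), N ≤ f →
                pvRunB s1 s2 sc f ((i, j) :: rest) D = pvRunB s1 s2 sc (f - N) rest D') ∧
              (∀ p v, D'.get? p = some v → v = pvW s1 s2 sc M0 p.1 p.2) ∧
              (∀ p v, D.get? p = some v → D'.get? p = some v) ∧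
              (∀ p v, D'.get? p = some v → D.get? p = some v ∨ (i ≤ p.1 ∧ j ≤ p.2)) ∧
              pvKnown s1 s2 D' i j = some (pvW s1 s2 sc M0 i j) := by
          intro hnone
          have step1 : ∀ (f' : Nat) (st : List (Int × Int)),
              pvRunB s1 s2 sc (f' + 1) ((i, j) :: st) D
                = pvRunB s1 s2 sc f' ((i+1, j) :: (i, j+1) :: (i, j) :: st) D := by
            intro f' st
            rcases hka' : pvKnown s1 s2 D (i+1) j with _ | a'
            · simp [pvRunB, hk, hc1, hc2, hcc, hka']
            · rcases hkb' : pvKnown s1 s2 D i (j+1) with _ | b'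
              · simp [pvRunB, hk, hc1, hc2, hcc, hka', hkb']
              · rcases hnone with h | h
                · rw [h] at hka'; cases hka'
                · rw [h] at hkb'; cases hkb'
          obtain ⟨Na, Da, hNa1, hNa4, hstepa, hInvA, hMonA, hDomA, hResA⟩ :=
            ih (i+1) j D hInv hSup (by omega) (by omega) hj1 hj2 (by unfold pvM at *; omega)
          obtain ⟨Nb, Db, hNb1, hNb4, hstepb, hInvB, hMonB, hDomB, hResB⟩ :=
            ih i (j+1) Da hInvA (fun p v hv => hMonA p v (hSup p v hv)) hi1 hi2 (by omega) (by omega)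
              (by unfold pvM at *; omega)
          have hDbm : Db.get? (i, j) = none := by
            rcases h0 : Db.get? (i, j) with _ | w
            · rfl
            · rcases hDomB (i, j) w h0 with hin | ⟨_, hb2⟩
              · rcases hDomA (i, j) w hin with hin2 | ⟨ha2, _⟩
                · rw [hDm] at hin2; cases hin2
                · have ha2' : i + 1 ≤ i := by simpa using ha2
                  omega
              · have hb2' : j + 1 ≤ j := by simpa using hb2
                omega
          have hkDb : pvKnown s1 s2 Db i j = none :=
            known_none_intro s1 s2 Db i j hDbm (by omega)
          have hResA' : pvKnown s1 s2 Db (i+1) j = some (pvW s1 s2 sc M0 (i+1) j) :=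
            known_stable s1 s2 sc M0 Da Db hInvB hMonB (i+1) j hResA
          refine ⟨Na + Nb + 2, Db.insert (i, j) (pvW s1 s2 sc M0 i j), by omega,
            by omega, ?_, ?_, ?_, ?_, ?_⟩
          · intro f rest hf
            obtain ⟨f', rfl⟩ : ∃ f', f = f' + 1 := ⟨f - 1, by omega⟩
            rw [step1 f' rest, hstepa f' ((i, j+1) :: (i, j) :: rest) (by omega),
              hstepb (f' - Na) ((i, j) :: rest) (by omega)]
            obtain ⟨g, hg⟩ : ∃ g, f' - Na - Nb = g + 1 := ⟨f' - Na - Nb - 1, by omega⟩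
            rw [hg]
            have step2 : pvRunB s1 s2 sc (g + 1) ((i, j) :: rest) Db
                = pvRunB s1 s2 sc g rest
                    (Db.insert (i, j)
                      (if (pvW s1 s2 sc M0 (i+1) j).2 > (pvW s1 s2 sc M0 i (j+1)).2
                       then pvW s1 s2 sc M0 (i+1) j else pvW s1 s2 sc M0 i (j+1))) := by
              simp [pvRunB, hkDb, hc1, hc2, hcc, hResA', hResB]
            rw [step2, ← hW]
            first
            | (congr 1; omega)
            | congr 1
          · exact hinsert Db hInvB
          · intro p v hv
            have hp : p ≠ (i, j) := by
              intro h; rw [h, hDm] at hv; cases hv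
            rw [PySem.Dict.get?_insert, if_neg hp]
            exact hMonB p v (hMonA p v hv)
          · intro p v hv
            rw [PySem.Dict.get?_insert] at hv
            by_cases hp : p = (i, j)
            · right; rw [hp]; exact ⟨le_refl _, le_refl _⟩
            · rw [if_neg hp] at hv
              rcases hDomB p v hv with hin | ⟨ha2, hb2⟩
              · rcases hDomA p v hin with hin2 | ⟨ha3, hb3⟩
                · exact Or.inl hin2
                · right; omega
              · right; omega
          · exact known_of_get _ _ _ i j _ (by rw [PySem.Dict.get?_insert, if_pos rfl])
        rcases hka : pvKnown s1 s2 D (i+1) j with _ | a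
        · exact pushCase (Or.inl hka)
        · rcases hkb : pvKnown s1 s2 D i (j+1) with _ | b
          · exact pushCase (Or.inr hkb)
          · -- both children ready: one compute step
            have ha : a = pvW s1 s2 sc M0 (i+1) j :=
              known_correct s1 s2 sc M0 D hInv hSup (i+1) j a hka
            have hb : b = pvW s1 s2 sc M0 i (j+1) :=
              known_correct s1 s2 sc M0 D hInv hSup i (j+1) b hkb
            refine ⟨1, D.insert (i, j) (pvW s1 s2 sc M0 i j), le_refl _, by omega, ?_, ?_, ?_, ?_, ?_⟩
            · intro f rest hf
              obtain ⟨f', rfl⟩ : ∃ f', f = f' + 1 := ⟨f - 1, by omega⟩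
              have step1 : pvRunB s1 s2 sc (f' + 1) ((i, j) :: rest) D
                  = pvRunB s1 s2 sc f' rest
                      (D.insert (i, j) (if a.2 > b.2 then a else b)) := by
                simp [pvRunB, hk, hc1, hc2, hcc, hka, hkb]
              rw [step1, ha, hb, ← hW]
              first
              | (congr 1; omega)
              | congr 1
            · exact hinsert D hInv
            · intro p v hv
              have hp : p ≠ (i, j) := by
                intro h; rw [h, hDm] at hv; cases hv
              rw [PySem.Dict.get?_insert, if_neg hp]
              exact hv
            · intro p v hv
              rw [PySem.Dict.get?_insert] at hv
              by_cases hp : p = (i, j)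
              · right; rw [hp]; exact ⟨le_refl _, le_refl _⟩
              · rw [if_neg hp] at hv
                exact Or.inl hv
            · exact known_of_get _ _ _ i j _ (by rw [PySem.Dict.get?_insert, if_pos rfl])
    · -- resolved frame: one skip step
      refine ⟨1, D, le_refl _, by omega, ?_, hInv, fun p v h => h, fun p v h => Or.inl h, ?_⟩
      · intro f rest hf
        obtain ⟨f', rfl⟩ : ∃ f', f = f' + 1 := ⟨f - 1, by omega⟩
        have : pvRunB s1 s2 sc (f' + 1) ((i, j) :: rest) D = pvRunB s1 s2 sc f' rest D := by
          simp [pvRunB, hk]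
        rw [this]
        first
        | (congr 1; omega)
        | congr 1
      · rw [hk, known_correct s1 s2 sc M0 D hInv hSup i j v hk]

-- full B pipeline on the main rectangle
theorem runB_main (s1 s2 : List Char) (sc : PySem.Dict String Int)
    (M0 : PySem.Dict (Int × Int) (List Char × Int)) (one two : Int)
    (h1 : -(s1.length : Int) ≤ one) (h2 : one ≤ (s1.length : Int))
    (h3 : -(s2.length : Int) ≤ two) (h4 : two ≤ (s2.length : Int)) :
    pvKnown s1 s2
      (pvRunB s1 s2 sc
        (4 ^ (((s1.length : Int) - one).toNat + ((s2.length : Int) - two).toNat + 1))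
        [(one, two)] M0) one two = some (pvW s1 s2 sc M0 one two) := by
  obtain ⟨N, D', hN1, hN4, hstep, _, _, _, hRes⟩ :=
    runB_go s1 s2 sc M0 (pvM s1 s2 one two + 1) one two M0
      (fun p v hv => (pvW_memo s1 s2 sc M0 p.1 p.2 v (by simpa using hv)).symm)
      (fun _ _ hv => hv) h1 h2 h3 h4 (by omega)
  have hfuel : N ≤ 4 ^ (((s1.length : Int) - one).toNat + ((s2.length : Int) - two).toNat + 1) := by
    have : (((s1.length : Int) - one).toNat + ((s2.length : Int) - two).toNat + 1)
        = pvM s1 s2 one two + 1 := rfl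
    rw [this]
    exact hN4
  rw [hstep _ [] hfuel, runB_nil]
  exact hRes

-- a frame that is already resolved drains in one step and the loop stops
theorem runB_single_resolved (s1 s2 : List Char) (sc : PySem.Dict String Int)
    (M0 : PySem.Dict (Int × Int) (List Char × Int)) (f : Nat) (one two : Int)
    (v : List Char × Int) (hk : pvKnown s1 s2 M0 one two = some v) :
    pvKnown s1 s2 (pvRunB s1 s2 sc (f+1) [(one, two)] M0) one two = some v := by
  have : pvRunB s1 s2 sc (f+1) [(one, two)] M0 = pvRunB s1 s2 sc f [] M0 := by
    simp [pvRunB, hk]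
  rw [this, runB_nil]
  exact hk

-- the keys of an association-list dict, for the memo-hit case of Pre_
theorem contains_foldl_insert {ν : Type} (l : List ((Int × Int) × ν)) (k : Int × Int) :
    ∀ (d : PySem.Dict (Int × Int) ν),
    (l.foldl (fun d p => d.insert p.1 p.2) d).contains k = (k ∈ l.map Prod.fst || d.contains k) := by
  induction l with
  | nil => intro d; simp
  | cons p l ih =>
    intro d
    rw [List.foldl_cons, ih, List.map_cons]
    simp only [PySem.Dict.contains_insert, List.mem_cons]
    by_cases hk : k = p.1 <;> by_cases hm : k ∈ l.map Prod.fst <;> simp [hk, hm]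

theorem contains_ofList_keys {ν : Type} (pairs : List ((Int × Int) × ν)) (k : Int × Int) :
    (PySem.Dict.ofList pairs).contains k = decide (k ∈ pairs.map Prod.fst) := by
  have h : PySem.Dict.ofList pairs
      = pairs.foldl (fun d p => d.insert p.1 p.2) PySem.Dict.empty := rfl
  rw [h, contains_foldl_insert]
  simp

-- A's preprocessing equals a filter
theorem replace_go_single (c : Char) :
    ∀ (fuel : Nat) (l acc : List Char), l.length ≤ fuel →
    PySem.Chars.replace.go [c] [] fuel l acc = acc.reverse ++ l.filter (fun a => a != c) := by
  intro fuel
  induction fuel with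
  | zero =>
    intro l acc hl
    have : l = [] := List.eq_nil_of_length_eq_zero (Nat.le_zero.mp hl)
    subst this
    simp [PySem.Chars.replace.go]
  | succ fuel ih =>
    intro l acc hl
    cases l with
    | nil => simp [PySem.Chars.replace.go]
    | cons c' t =>
      simp only [PySem.Chars.replace.go, List.isPrefixOf, Bool.and_true]
      by_cases hc : c = c'
      · subst hc
        simp only [BEq.rfl, if_true, List.length_cons, List.length_nil, Nat.zero_add,
          List.drop_succ_cons, List.drop_zero, List.reverse_nil, List.nil_append,
          List.filter_cons, bne_self_eq_false, Bool.false_eq_true, if_false]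
        exact ih t acc (by simpa using hl)
      · have : (c == c') = false := by simp [hc]
        simp only [this, Bool.false_eq_true, if_false, List.filter_cons]
        rw [ih t (c' :: acc) (by simpa using hl)]
        have : (c' != c) = true := by simp [Ne.symm hc]
        simp [this]

theorem replace_single_empty (cs : List Char) (c : Char) :
    PySem.Chars.replace cs [c] [] = cs.filter (fun a => a != c) := by
  rw [PySem.Chars.replace]
  simp only [List.isEmpty_cons, Bool.false_eq_true, if_false]
  rw [replace_go_single c cs.length cs [] (le_refl _)]
  simp

theorem strip_fold (sc : PySem.Dict String Int) :
    ∀ (cs s0 : List Char),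
    cs.foldl (fun cur c => if sc.contains (String.singleton c) then cur else PySem.Chars.replace cur [c] []) s0
      = s0.filter (fun a => sc.contains (String.singleton a) || !(cs.contains a)) := by
  intro cs
  induction cs with
  | nil => intro s0; simp
  | cons c cs ih =>
    intro s0
    rw [List.foldl_cons]
    by_cases hc : sc.contains (String.singleton c)
    · simp only [hc, if_true]
      rw [ih s0]
      apply List.filter_congr
      intro a _
      by_cases hac : a = c
      · subst hac; simp [hc]
      · simp [hac]
    · simp only [hc, Bool.false_eq_true, if_false]
      rw [replace_single_empty, ih, List.filter_filter]
      apply List.filter_congr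
      intro a _
      by_cases hac : a = c
      · subst hac
        simp [hc]
      · simp [hac]

theorem stripA_eq (sc : PySem.Dict String Int) (s : List Char) :
    pvStripA sc s = s.filter (fun c => sc.contains (String.singleton c)) := by
  unfold pvStripA
  rw [strip_fold]
  apply List.filter_congr
  intro a ha
  simp [ha]

-- ===== VERDICT (by name: the statement is the Claim_ definition above) =====
theorem lcsScores_spec : Claim_equal_lcsScores := by
  intro string1 string2 Scores D one two _ hpre
  unfold Spec_lcsScores
  rcases hpre with ⟨hD, hcase⟩ | ⟨hD, hcase⟩
  · -- D = none: stripped strings, empty memo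
    subst hD
    simp only [lcsScores, lcsScores_alt, stripA_eq]
    set sc := PySem.Dict.ofList Scores with hsc
    set t1 := string1.toList.filter (fun c => sc.contains (String.singleton c)) with ht1
    set t2 := string2.toList.filter (fun c => sc.contains (String.singleton c)) with ht2
    by_cases hmain : -(t1.length : Int) ≤ one ∧ one ≤ (t1.length : Int) ∧
        -(t2.length : Int) ≤ two ∧ two ≤ (t2.length : Int)
    · obtain ⟨hA, _⟩ := recA_correct t1 t2 sc PySem.Dict.empty
        (((t1.length : Int) - one).toNat + ((t2.length : Int) - two).toNat + 1) one two
        PySem.Dict.empty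
        (by intro p v hv; rw [PySem.Dict.get?_empty] at hv; cases hv)
        (fun _ _ hv => hv) hmain.1 hmain.2.1 hmain.2.2.1 hmain.2.2.2 (by unfold pvM; omega)
      rw [hA, runB_main t1 t2 sc PySem.Dict.empty one two
        hmain.1 hmain.2.1 hmain.2.2.1 hmain.2.2.2]
    · have hbnd : (t1.length : Int) = one ∨ (t2.length : Int) = two := by
        rcases hcase with h | h | h
        · exact absurd h hmain
        · exact Or.inl h.symm
        · exact Or.inr h.symm
      have hk : pvKnown t1 t2 PySem.Dict.empty one two = some ([], 0) :=
        known_some_edge t1 t2 PySem.Dict.empty one two (PySem.Dict.get?_empty _) hbnd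
      rw [recA_edge t1 t2 sc PySem.Dict.empty _ one two (PySem.Dict.get?_empty _) hbnd]
      obtain ⟨f, hf⟩ := pow4_succ (((t1.length : Int) - one).toNat + ((t2.length : Int) - two).toNat + 1)
      rw [hf, runB_single_resolved t1 t2 sc PySem.Dict.empty f one two ([], 0) hk]
  · -- D = some l: raw strings, seeded memo
    rcases Option.ne_none_iff_exists'.mp hD with ⟨l, hl⟩
    subst hl
    simp only [lcsScores, lcsScores_alt]
    set sc := PySem.Dict.ofList Scores with hsc
    set M0 := pvMemoOfList l with hM0
    obtain ⟨f, hf⟩ := pow4_succ (((string1.toList.length : Int) - one).toNat + ((string2.toList.length : Int) - two).toNat + 1)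
    by_cases hm : ∃ v, M0.get? (one, two) = some v
    · obtain ⟨v, hv⟩ := hm
      rw [recA_hit string1.toList string2.toList sc M0 _ one two v hv, hf,
        runB_single_resolved string1.toList string2.toList sc M0 f one two v
          (known_of_get _ _ _ one two v hv)]
    · have hvnone : M0.get? (one, two) = none := by
        rcases h0 : M0.get? (one, two) with _ | w
        · rfl
        · exact absurd ⟨w, h0⟩ hm
      rcases hcase with hhit | hbnd1 | hbnd2 | hrect
      · -- the memo-hit disjunct contradicts the miss: same key list in both dicts
        exfalso
        have hM0c : M0.contains (one, two) = true := by
          rw [hM0, pvMemoOfList, contains_ofList_keys]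
          rw [contains_ofList_keys] at hhit
          simp only [List.map_map, Option.getD_some] at hhit ⊢
          convert hhit using 3
        rw [PySem.Dict.contains_eq_isSome_get?, hvnone] at hM0c
        cases hM0c
      · -- one = len(string1): table edge
        have hbnd : (string1.toList.length : Int) = one ∨ (string2.toList.length : Int) = two :=
          Or.inl hbnd1.symm
        have hk : pvKnown string1.toList string2.toList M0 one two = some ([], 0) :=
          known_some_edge string1.toList string2.toList M0 one two hvnone hbnd
        rw [recA_edge string1.toList string2.toList sc M0 _ one two hvnone hbnd, hf,
          runB_single_resolved string1.toList string2.toList sc M0 f one two ([], 0) hk]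
      · -- two = len(string2): table edge
        have hbnd : (string1.toList.length : Int) = one ∨ (string2.toList.length : Int) = two :=
          Or.inr hbnd2.symm
        have hk : pvKnown string1.toList string2.toList M0 one two = some ([], 0) :=
          known_some_edge string1.toList string2.toList M0 one two hvnone hbnd
        rw [recA_edge string1.toList string2.toList sc M0 _ one two hvnone hbnd, hf,
          runB_single_resolved string1.toList string2.toList sc M0 f one two ([], 0) hk]
      · -- main rectangle
        obtain ⟨hb1, hb2, hb3, hb4, _⟩ := hrect
        obtain ⟨hA, _⟩ := recA_correct string1.toList string2.toList sc M0
          (((string1.toList.length : Int) - one).toNat + ((string2.toList.length : Int) - two).toNat + 1)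
          one two M0
          (fun p v hv => (pvW_memo string1.toList string2.toList sc M0 p.1 p.2 v (by simpa using hv)).symm)
          (fun _ _ hv => hv) hb1 hb2 hb3 hb4 (by unfold pvM; omega)
        rw [hA, runB_main string1.toList string2.toList sc M0 one two hb1 hb2 hb3 hb4]
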